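-- pv_equiv track=rewrite | github.com/acarrasco/advent_of_code | 2024/day05/part1.py | parse
-- ===== SOURCE A (Python) =====
-- def parse(lines):
--     ordering = []
--     updating_sequences = []
--
--     lines_it = iter(lines)
--     line = next(lines_it).strip()
--     while line:
--         ordering.append(tuple(int(x) for x in line.split('|')))
--         line = next(lines_it, '').strip()
--     line = next(lines_it, '').strip()
--     while line:
--         updating_sequences.append([int(x) for x in line.split(',')])
--         line = next(lines_it, '').strip()
--     return ordering, updating_sequences
-- ===== SOURCE B (Python) =====
-- def parse(lines):
--     stripped = [line.strip() for line in lines]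
--     i = stripped.index('') if '' in stripped else len(stripped)
--     rest = stripped[i + 1:]
--     j = rest.index('') if '' in rest else len(rest)
--     ordering = [tuple(int(x) for x in s.split('|')) for s in stripped[:i]]
--     updating_sequences = [[int(x) for x in s.split(',')] for s in rest[:j]]
--     return ordering, updating_sequences
-- ===== Notes on version B (the rewrite author's own statement) =====
-- stated objective: simpler
-- what changed: Replaces A's two sentinel-driven iterator loops (next with default, mutate-and-append) by one strip pass followed by blank-line segmentation: find the first two blank indices with list.index and parse the two slices with comprehensions.
-- crash fix: On an empty list of lines A raises StopIteration (the first next() has no default); B returns ([], []). — e.g. on parse([]): A raises StopIteration, B returns ([], [])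
import Mathlib
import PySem

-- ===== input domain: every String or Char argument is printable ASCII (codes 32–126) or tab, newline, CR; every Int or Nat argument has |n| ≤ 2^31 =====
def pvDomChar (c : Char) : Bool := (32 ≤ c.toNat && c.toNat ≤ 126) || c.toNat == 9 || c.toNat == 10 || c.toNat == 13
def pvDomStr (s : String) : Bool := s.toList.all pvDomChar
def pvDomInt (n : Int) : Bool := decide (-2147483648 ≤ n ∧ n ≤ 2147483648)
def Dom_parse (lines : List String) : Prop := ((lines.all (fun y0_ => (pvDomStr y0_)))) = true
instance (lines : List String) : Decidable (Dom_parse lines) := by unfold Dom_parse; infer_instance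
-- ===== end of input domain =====

-- B replaces A's two sentinel-driven iterator loops by a single strip pass plus
-- blank-line segmentation with index/slices (objective: simpler decomposition).
-- On empty input A raises StopIteration while B returns ([], []) — see Raises_parse.

-- ===== PORT A =====
-- int(x): PySem.Int.ofStr? is none exactly where Python raises ValueError (excluded by Pre_);
-- the .getD defaults below are never reached inside Pre_.
def pvIntA (s : String) : Int := (PySem.Int.ofStr? s).getD 0
-- tuple(int(x) for x in line.split('|')): a tuple of arity ≠ 2 is not a value of the
-- declared type (Int × Int); Pre_ restricts to exactly-2 fields.
def pvRuleA (line : String) : Int × Int :=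
  let ps := ((PySem.Str.split? line "|").getD []).map pvIntA
  (ps.getD 0 0, ps.getD 1 0)
def pvSeqA (line : String) : List Int := ((PySem.Str.split? line ",").getD []).map pvIntA

-- second while loop: line = next(lines_it, '').strip(); exhaustion gives '' and the loop exits
def pvLoop2A (it : List String) (acc : List (List Int)) : List (List Int) :=
  match it with
  | [] => acc
  | l :: rest =>
    let line := PySem.Str.strip l
    if line = "" then acc else pvLoop2A rest (acc ++ [pvSeqA line])

-- first while loop; on exhaustion the extra next(lines_it, '') yields '' so the second loop never runs
def pvLoop1A (it : List String) (acc : List (Int × Int)) : (List (Int × Int)) × List (List Int) :=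
  match it with
  | [] => (acc, [])
  | l :: rest =>
    let line := PySem.Str.strip l
    if line = "" then (acc, pvLoop2A rest []) else pvLoop1A rest (acc ++ [pvRuleA line])

def parse (lines : List String) : (List (Int × Int)) × List (List Int) :=
  match lines with
  | [] => ([], [])   -- Python: first next() raises StopIteration here (outside Pre_)
  | _ :: _ => pvLoop1A lines []

-- ===== PORT B =====
def pvIntB (s : String) : Int := (PySem.Int.ofStr? s).getD 0
def pvRuleB (s : String) : Int × Int :=
  let ps := ((PySem.Str.split? s "|").getD []).map pvIntB
  (ps.getD 0 0, ps.getD 1 0)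
def pvSeqB (s : String) : List Int := ((PySem.Str.split? s ",").getD []).map pvIntB

def parse_alt (lines : List String) : (List (Int × Int)) × List (List Int) :=
  let stripped := lines.map PySem.Str.strip
  -- i = stripped.index('') if '' in stripped else len(stripped)
  let i : Int := match PySem.List.index? stripped "" with
    | some k => (k : Int)
    | none => (stripped.length : Int)
  let rest := PySem.List.slice stripped (some (i + 1)) none
  let j : Int := match PySem.List.index? rest "" with
    | some k => (k : Int)
    | none => (rest.length : Int)
  ((PySem.List.slice stripped none (some i)).map pvRuleB,
   (PySem.List.slice rest none (some j)).map pvSeqB)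

-- ===== PRECONDITION & SPEC =====
def pvOkRule (s : String) : Prop :=
  ((PySem.Str.split? s "|").getD []).length = 2 ∧
    ∀ x ∈ (PySem.Str.split? s "|").getD [], (PySem.Int.ofStr? x).isSome
def pvOkSeq (s : String) : Prop :=
  ∀ x ∈ (PySem.Str.split? s ",").getD [], (PySem.Int.ofStr? x).isSome
-- Pre_ excludes: the empty list (A raises StopIteration); first-block lines that do not split
-- on '|' into exactly two int()-parseable fields (ValueError, or a tuple not of the declared
-- type Int × Int); second-block lines with a non-int()-parseable ','-field (ValueError).
def Pre_parse (lines : List String) : Prop :=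
  let stripped := lines.map PySem.Str.strip
  let b1 := stripped.takeWhile (fun s => s ≠ "")
  let b2 := (stripped.drop (b1.length + 1)).takeWhile (fun s => s ≠ "")
  lines ≠ [] ∧ (∀ s ∈ b1, pvOkRule s) ∧ (∀ s ∈ b2, pvOkSeq s)
instance (lines : List String) : Decidable (Pre_parse lines) := by
  unfold Pre_parse pvOkRule pvOkSeq; infer_instance
def pvWitness_parse : List String := ["1|2", "47|13", "", "1,2,3", "4,5"]

-- On the empty input list A raises StopIteration (the first next() has no default); B returns ([], []).
def Raises_parse (lines : List String) : Prop := lines = []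
instance (lines : List String) : Decidable (Raises_parse lines) := by
  unfold Raises_parse; infer_instance
def pvRaiseWitness_parse : List String := []
def pvRaiseWitnessOut_parse : (List (Int × Int)) × List (List Int) := ([], [])

def Spec_parse (lines : List String) (out : (List (Int × Int)) × List (List Int)) : Prop := out = parse_alt lines
instance (lines : List String) (out : (List (Int × Int)) × List (List Int)) : Decidable (Spec_parse lines out) := by unfold Spec_parse; infer_instance

-- ===== CLAIM (what is proved, stated in full; the proofs are below) =====
def Claim_equal_parse : Prop := ∀ (lines : List String), Dom_parse lines → Pre_parse lines → Spec_parse lines (parse lines)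
def Claim_raises_parse : Prop := (∀ (lines : List String), Dom_parse lines → Raises_parse lines → ¬ Pre_parse lines) ∧ (Dom_parse (pvRaiseWitness_parse) ∧ Raises_parse (pvRaiseWitness_parse) ∧ parse_alt (pvRaiseWitness_parse) = pvRaiseWitnessOut_parse)

-- ===== LEMMAS AND PROOFS =====

-- the predicate 'line is truthy after strip', shared spec vocabulary for both loop shapes
def pvNB (x : String) : Bool := x ≠ ""

-- A's helpers and B's helpers are the same parsing expressions
theorem pvRuleB_eq : pvRuleB = pvRuleA := rfl
theorem pvSeqB_eq : pvSeqB = pvSeqA := rfl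

theorem pvLoop2A_eq (it : List String) (acc : List (List Int)) :
    pvLoop2A it acc =
      acc ++ ((it.map PySem.Str.strip).takeWhile pvNB).map pvSeqA := by
  induction it generalizing acc with
  | nil => simp [pvLoop2A]
  | cons l rest ih =>
    by_cases h : PySem.Str.strip l = "" <;>
      simp [pvLoop2A, h, pvNB, ih]

theorem pvLoop1A_eq (it : List String) (acc : List (Int × Int)) :
    pvLoop1A it acc =
      (acc ++ ((it.map PySem.Str.strip).takeWhile pvNB).map pvRuleA,
       (((it.map PySem.Str.strip).drop
           (((it.map PySem.Str.strip).takeWhile pvNB).length + 1)).takeWhile pvNB).map pvSeqA) := by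
  induction it generalizing acc with
  | nil => simp [pvLoop1A]
  | cons l rest ih =>
    by_cases h : PySem.Str.strip l = ""
    · simp [pvLoop1A, h, pvNB, pvLoop2A_eq]
    · simp [pvLoop1A, h, pvNB, ih]

-- a ''-free prefix is exactly what takeWhile pvNB keeps
theorem takeWhile_prefix_blank (pre suf : List String) (h : "" ∉ pre) :
    (pre ++ "" :: suf).takeWhile pvNB = pre := by
  induction pre with
  | nil => simp [pvNB]
  | cons a t ih =>
    simp only [List.mem_cons, not_or] at h
    simp [pvNB, Ne.symm h.1, ih h.2]

theorem takeWhile_no_blank (s : List String) (h : "" ∉ s) :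
    s.takeWhile pvNB = s := by
  induction s with
  | nil => rfl
  | cons a t ih =>
    simp only [List.mem_cons, not_or] at h
    simp [pvNB, Ne.symm h.1, ih h.2]

theorem slice_take_index (s : List String) :
    PySem.List.slice s none (some (match PySem.List.index? s "" with
      | some k => (k : Int) | none => (s.length : Int))) =
      s.takeWhile pvNB := by
  rcases hidx : PySem.List.index? s "" with _ | k
  · rw [PySem.List.index?_eq_none_iff] at hidx
    simp only [PySem.List.slice_to_natCast, List.take_length]
    exact (takeWhile_no_blank s hidx).symm
  · obtain ⟨pre, suf, hs, hlen, hmem⟩ := (PySem.List.index?_eq_some_iff s "" k).mp hidx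
    subst hs
    rw [PySem.List.slice_to_natCast, takeWhile_prefix_blank pre suf hmem, ← hlen,
      List.take_left]

theorem slice_drop_index (s : List String) :
    PySem.List.slice s (some ((match PySem.List.index? s "" with
      | some k => (k : Int) | none => (s.length : Int)) + 1)) none =
      s.drop ((s.takeWhile pvNB).length + 1) := by
  rcases hidx : PySem.List.index? s "" with _ | k
  · rw [PySem.List.index?_eq_none_iff] at hidx
    have h1 : ((s.length : Int) + 1) = ((s.length + 1 : Nat) : Int) := by push_cast; ring
    rw [h1, PySem.List.slice_from_natCast, takeWhile_no_blank s hidx]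
  · obtain ⟨pre, suf, hs, hlen, hmem⟩ := (PySem.List.index?_eq_some_iff s "" k).mp hidx
    subst hs
    have h1 : ((k : Int) + 1) = ((k + 1 : Nat) : Int) := by push_cast; ring
    rw [h1, PySem.List.slice_from_natCast, takeWhile_prefix_blank pre suf hmem, ← hlen]

theorem parse_alt_eq (lines : List String) :
    parse_alt lines =
      (((lines.map PySem.Str.strip).takeWhile pvNB).map pvRuleA,
       ((((lines.map PySem.Str.strip).drop
            (((lines.map PySem.Str.strip).takeWhile pvNB).length + 1)).takeWhile pvNB).map pvSeqA)) := by
  simp only [parse_alt]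
  rw [pvRuleB_eq, pvSeqB_eq, slice_drop_index, slice_take_index, slice_take_index]

-- ===== VERDICT (by name: the statement is the Claim_ definition above) =====
theorem parse_spec : Claim_equal_parse := by
  intro lines _ _
  unfold Spec_parse
  rw [parse_alt_eq]
  match lines with
  | [] => rfl
  | l :: rest =>
    show pvLoop1A (l :: rest) [] = _
    rw [pvLoop1A_eq]
    simp

@[simp] theorem parse_raises : Claim_raises_parse := by
  unfold Claim_raises_parse
  refine ⟨?_, by decide⟩
  intro lines _ hr hpre
  exact hpre.1 hr
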